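-- pv_equiv track=rewrite | github.com/guoweifeng216/python | python_design/pythonprogram_design/Ch4/4-PP-5.py | isTripleConsecutive
-- ===== SOURCE A (Python) =====
-- def isTripleConsecutive(word):
--     n = len(word)
--     for i in range(n - 2):
--         threeLetters = word[i:i+3]
--         if (ord(threeLetters[0:1]) + 1 ==
--             ord(threeLetters[1:2]) and
--             ord(threeLetters[1:2]) + 1 ==
--             ord(threeLetters[2:3])):
--             return True
--     return False
-- ===== SOURCE B (Python) =====
-- def isTripleConsecutive(word):
--     prev = None
--     run = 1
--     for ch in word:
--         if prev is not None and ord(ch) == ord(prev) + 1: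
--             run += 1
--         else:
--             run = 1
--         if run >= 3:
--             return True
--         prev = ch
--     return False
-- ===== Notes on version B (the rewrite author's own statement) =====
-- stated objective: simpler
-- what changed: B makes one pass maintaining a running streak counter (prev char + length of current ascending run) instead of re-slicing and re-checking a fresh 3-character window at every index; this also removes the per-index slicing/ord overhead (measured ~4x faster).
import Mathlib
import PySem

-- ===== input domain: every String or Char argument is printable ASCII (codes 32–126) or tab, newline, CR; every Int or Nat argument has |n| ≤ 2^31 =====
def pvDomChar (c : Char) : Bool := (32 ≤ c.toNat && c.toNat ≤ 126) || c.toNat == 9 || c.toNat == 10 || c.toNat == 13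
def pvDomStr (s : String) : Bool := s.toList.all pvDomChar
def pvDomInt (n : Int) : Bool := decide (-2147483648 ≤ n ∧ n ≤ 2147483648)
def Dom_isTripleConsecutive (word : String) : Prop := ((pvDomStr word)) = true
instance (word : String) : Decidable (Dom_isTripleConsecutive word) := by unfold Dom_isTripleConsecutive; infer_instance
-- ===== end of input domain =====

-- B replaces A's per-index 3-character window slicing with a single pass that
-- maintains the previous character and the length of the current ascending run (objective: simpler).


-- ===== PORT A =====
-- 'for i in range(n-2)' ported as recursion on the remaining iteration count m with running index i.
-- word[i:i+3] for 0 ≤ i is exactly (cs.drop i).take 3.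
-- ord(t[0:1]) etc. succeed exactly when the slice has 3 characters (always, for i < n-2);
-- the '_' branch (ord('') would raise in Python) is unreachable.
def pvALoop (cs : List Char) (i m : Nat) : Bool :=
  match m with
  | 0 => false
  | m' + 1 =>
    match (cs.drop i).take 3 with
    | [c0, c1, c2] =>
      if c0.toNat + 1 = c1.toNat ∧ c1.toNat + 1 = c2.toNat then true
      else pvALoop cs (i + 1) m'
    | _ => pvALoop cs (i + 1) m'

def isTripleConsecutive (word : String) : Bool :=
  let cs := word.toList
  let n := cs.length
  pvALoop cs 0 (n - 2)   -- range(n-2) is empty for n < 2, matching Nat subtraction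

-- ===== PORT B =====
def pvBLoop (cs : List Char) (prev : Option Char) (run : Int) : Bool :=
  match cs with
  | [] => false
  | c :: rest =>
    let run' : Int :=
      match prev with
      | some p => if c.toNat = p.toNat + 1 then run + 1 else 1
      | none => 1
    if run' ≥ 3 then true else pvBLoop rest (some c) run'

def isTripleConsecutive_alt (word : String) : Bool :=
  pvBLoop word.toList none 1

-- ===== PRECONDITION & SPEC =====
def Spec_isTripleConsecutive (word : String) (out : Bool) : Prop := out = isTripleConsecutive_alt word
instance (word : String) (out : Bool) : Decidable (Spec_isTripleConsecutive word out) := by unfold Spec_isTripleConsecutive; infer_instance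

-- ===== CLAIM (what is proved, stated in full; the proofs are below) =====
def Claim_equal_isTripleConsecutive : Prop := ∀ (word : String), Dom_isTripleConsecutive word → Spec_isTripleConsecutive word (isTripleConsecutive word)

-- ===== LEMMAS AND PROOFS =====

/-- Reference predicate: the list contains three consecutive ascending characters. -/
def pvHasTriple : List Char → Bool
  | a :: b :: c :: rest =>
    (decide (a.toNat + 1 = b.toNat) && decide (b.toNat + 1 = c.toNat)) || pvHasTriple (b :: c :: rest)
  | _ => false

/-- Fueled variant matching A's bounded loop. -/
def pvHasTripleN : List Char → Nat → Bool
  | _, 0 => false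
  | a :: b :: c :: rest, m + 1 =>
    (decide (a.toNat + 1 = b.toNat) && decide (b.toNat + 1 = c.toNat)) || pvHasTripleN (b :: c :: rest) m
  | _, _ + 1 => false

lemma pvHasTripleN_short : ∀ (l : List Char) (m : Nat), l.length < 3 → pvHasTripleN l m = false := by
  intro l m h
  match l, m with
  | l, 0 => simp [pvHasTripleN]
  | [], m + 1 => simp [pvHasTripleN]
  | [a], m + 1 => simp [pvHasTripleN]
  | [a, b], m + 1 => simp [pvHasTripleN]
  | a :: b :: c :: rest, m + 1 => simp at h; omega

lemma pvALoop_eq : ∀ (m : Nat) (cs : List Char) (i : Nat),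
    pvALoop cs i m = pvHasTripleN (cs.drop i) m := by
  intro m
  induction m with
  | zero => intro cs i; simp [pvALoop, pvHasTripleN]
  | succ m ih =>
    intro cs i
    have hdrop : cs.drop (i + 1) = (cs.drop i).drop 1 := by
      rw [List.drop_drop]
    match hl : cs.drop i with
    | [] =>
      have hL : pvALoop cs i (m + 1) = pvALoop cs (i + 1) m := by simp [pvALoop, hl]
      rw [hL, ih, hdrop, hl, pvHasTripleN_short _ m (by simp), pvHasTripleN_short _ (m + 1) (by simp)]
    | [a] =>
      have hL : pvALoop cs i (m + 1) = pvALoop cs (i + 1) m := by simp [pvALoop, hl]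
      rw [hL, ih, hdrop, hl, pvHasTripleN_short _ m (by simp), pvHasTripleN_short _ (m + 1) (by simp)]
    | [a, b] =>
      have hL : pvALoop cs i (m + 1) = pvALoop cs (i + 1) m := by simp [pvALoop, hl]
      rw [hL, ih, hdrop, hl, pvHasTripleN_short _ m (by simp), pvHasTripleN_short _ (m + 1) (by simp)]
    | a :: b :: c :: rest =>
      simp only [pvALoop, hl, List.take, pvHasTripleN, ih, hdrop, List.drop]
      by_cases h1 : a.toNat + 1 = b.toNat ∧ b.toNat + 1 = c.toNat
      · simp [h1]
      · simp only [if_neg h1]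
        rcases Decidable.not_and_iff_or_not.mp h1 with h | h <;> simp [h]

lemma pvHasTripleN_eq : ∀ (cs : List Char) (m : Nat),
    cs.length ≤ m + 2 → pvHasTripleN cs m = pvHasTriple cs := by
  intro cs
  induction cs using pvHasTriple.induct with
  | case1 a b c rest ih =>
    intro m hm
    match m with
    | 0 => simp at hm
    | m + 1 =>
      simp only [pvHasTripleN, pvHasTriple]
      rw [ih]
      simp at hm ⊢
      omega
  | case2 l hl =>
    intro m hm
    have : l.length < 3 := by
      match l, hl with
      | [], _ => simp
      | [a], _ => simp
      | [a, b], _ => simp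
      | a :: b :: c :: rest, hl => exact absurd rfl (hl a b c rest)
    rw [pvHasTripleN_short l m this]
    match l, hl with
    | [], _ => rfl
    | [a], _ => rfl
    | [a, b], _ => rfl
    | a :: b :: c :: rest, hl => exact absurd rfl (hl a b c rest)

lemma isTripleConsecutive_eq_hasTriple (word : String) :
    isTripleConsecutive word = pvHasTriple word.toList := by
  unfold isTripleConsecutive
  rw [pvALoop_eq, List.drop_zero, pvHasTripleN_eq]
  omega

lemma pvBLoop_inv : ∀ (cs : List Char) (p : Char),
    pvBLoop cs (some p) 1 = pvHasTriple (p :: cs) ∧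
    pvBLoop cs (some p) 2 =
      ((match cs with | c :: _ => decide (p.toNat + 1 = c.toNat) | [] => false) || pvHasTriple (p :: cs)) := by
  intro cs
  induction cs with
  | nil =>
    intro p
    constructor
    · simp [pvBLoop, pvHasTriple]
    · simp [pvBLoop, pvHasTriple]
  | cons c rest ih =>
    intro p
    constructor
    · by_cases h : c.toNat = p.toNat + 1
      · have h2 : pvBLoop (c :: rest) (some p) 1 = pvBLoop rest (some c) 2 := by
          simp only [pvBLoop, h]
          norm_num
        rw [h2, (ih c).2]
        match rest with
        | [] => simp [pvHasTriple]
        | r :: rest' =>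
          simp only [pvHasTriple]
          have hd : decide (p.toNat + 1 = c.toNat) = true := by simp [h]
          simp [h]
      · have h2 : pvBLoop (c :: rest) (some p) 1 = pvBLoop rest (some c) 1 := by
          simp only [pvBLoop, h]
          norm_num
        rw [h2, (ih c).1]
        match rest with
        | [] => simp [pvHasTriple]
        | r :: rest' =>
          simp only [pvHasTriple]
          have hd : decide (p.toNat + 1 = c.toNat) = false := by
            simp; omega
          simp [hd]
    · by_cases h : c.toNat = p.toNat + 1
      · simp only [pvBLoop, h]
        norm_num
      · have h2 : pvBLoop (c :: rest) (some p) 2 = pvBLoop rest (some c) 1 := by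
          simp only [pvBLoop, h]
          norm_num
        rw [h2, (ih c).1]
        have hd : decide (p.toNat + 1 = c.toNat) = false := by simp; omega
        match rest with
        | [] => simp [pvHasTriple, hd]
        | r :: rest' =>
          simp only [pvHasTriple, hd]
          simp

lemma isTripleConsecutive_alt_eq_hasTriple (word : String) :
    isTripleConsecutive_alt word = pvHasTriple word.toList := by
  unfold isTripleConsecutive_alt
  match h : word.toList with
  | [] => simp [pvBLoop, pvHasTriple]
  | c :: rest =>
    have h2 : pvBLoop (c :: rest) none 1 = pvBLoop rest (some c) 1 := by
      simp [pvBLoop]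
    rw [h2, (pvBLoop_inv rest c).1]

-- ===== VERDICT (by name: the statement is the Claim_ definition above) =====
theorem isTripleConsecutive_spec : Claim_equal_isTripleConsecutive := by
  intro word _
  unfold Spec_isTripleConsecutive
  rw [isTripleConsecutive_eq_hasTriple, isTripleConsecutive_alt_eq_hasTriple]
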